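-- pv_equiv track=rewrite | github.com/seungriyou/algorithm-study | Implementation/SEA-6109.py | move_tiles
-- ===== SOURCE A (Python) =====
-- from typing import List
--
-- def move_tiles(game_map: List[int]) -> List[int]:
--     l = len(game_map)
--     if l < 2:
--         return game_map
--     for i in range(l):
--         j, k = 0, 1
--
--         for _ in range(game_map[i].count(0)):
--             game_map[i].remove(0)
--             game_map[i].append(0)
--
--         while k < l:
--             if game_map[i][j] == game_map[i][k]:
--                 game_map[i][j] += game_map[i].pop(k)
--                 game_map[i].append(0)
--             j += 1
--             k += 1
--     return game_map
-- ===== SOURCE B (Python) =====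
-- from typing import List
--
-- def move_tiles(game_map: List[int]) -> List[int]:
--     l = len(game_map)
--     if l < 2:
--         return game_map
--     out = []
--     for row in game_map:
--         tiles = [row[j] for j in range(l) if row[j] != 0]
--         merged = []
--         i = 0
--         while i < len(tiles):
--             if i + 1 < len(tiles) and tiles[i] == tiles[i + 1]:
--                 merged.append(tiles[i] * 2)
--                 i += 2
--             else:
--                 merged.append(tiles[i])
--                 i += 1
--         out.append(merged + [0] * (l - len(merged)))
--     return out
-- ===== Notes on version B (the rewrite author's own statement) =====
-- stated objective: alternative
-- what changed: Instead of repeatedly remove/append-ing zeros and merging with pop-and-append on the mutated row, B does one linear pass per row of the l-by-l board: read the l cells, drop zeros, merge adjacent equal tiles left-to-right once, pad with zeros; B returns a fresh list instead of mutating the argument. …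
-- outside the precondition, e.g. on move_tiles([[1, 2, 2], [3, 2, 2]]): A returns [[1, 2, 2], [3, 2, 2]], B returns [[1, 2], [3, 2]]; on move_tiles([[2, 2, 2], [2, 2, 2]]): A returns [[4, 2, 0], [4, 2, 0]], B returns [[4, 0], [4, 0]]
import Mathlib
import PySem

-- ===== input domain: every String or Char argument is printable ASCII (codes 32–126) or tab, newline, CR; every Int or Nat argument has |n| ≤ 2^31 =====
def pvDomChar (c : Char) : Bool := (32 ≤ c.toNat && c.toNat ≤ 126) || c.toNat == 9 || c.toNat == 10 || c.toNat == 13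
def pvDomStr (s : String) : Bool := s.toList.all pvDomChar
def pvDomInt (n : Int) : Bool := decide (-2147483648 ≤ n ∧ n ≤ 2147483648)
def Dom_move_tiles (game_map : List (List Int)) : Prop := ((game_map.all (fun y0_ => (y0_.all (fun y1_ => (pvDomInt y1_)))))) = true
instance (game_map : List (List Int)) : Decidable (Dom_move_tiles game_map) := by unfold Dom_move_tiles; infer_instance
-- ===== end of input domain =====

-- B replaces A's in-place remove/append zero-shuffling and pop-and-append merging with one linear
-- pass per row of the l×l board (read the l cells, drop zeros, merge adjacent equal tiles once, pad
-- with zeros). A mutates game_map in place; B builds a fresh list — the equivalence proved is about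
-- the RETURN value only.


-- ===== PORT A =====
-- one iteration of "game_map[i].remove(0); game_map[i].append(0)" (the none branch is Python's
-- ValueError, unreachable since the loop runs count(0) times)
def compactOnce (row : List Int) : List Int :=
  match PySem.List.remove? row 0 with
  | some r => r ++ [0]
  | none => row

-- one body of "while k < l: if row[j] == row[k]: row[j] += row.pop(k); row.append(0)"
def mergeStep (row : List Int) (j k : Int) : List Int :=
  match PySem.List.pyGet? row j, PySem.List.pyGet? row k with
  | some a, some b =>
      if a = b then
        match PySem.List.pop? row k with
        | some (v, r) => (PySem.List.pySetD r j (a + v)) ++ [0]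
        | none => row
      else row
  | _, _ => row

def mergeLoop : Nat → List Int → Int → Int → Int → List Int
  | 0, row, _, _, _ => row
  | fuel + 1, row, j, k, l =>
      if k < l then mergeLoop fuel (mergeStep row j k) (j + 1) (k + 1) l
      else row

def move_tiles (game_map : List (List Int)) : List (List Int) :=
  let l : Int := PySem.List.len game_map
  if l < 2 then game_map
  else
    game_map.map (fun row =>
      let row1 := (PySem.List.pyRange 0 (PySem.List.count row 0) 1).foldl
                    (fun r _ => compactOnce r) row
      mergeLoop row1.length row1 0 1 l)

-- ===== PORT B =====
-- the "while i < len(tiles)" pass of Source B: consume two equal adjacent tiles or one tile per step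
def mergePairs : List Int → List Int
  | [] => []
  | [x] => [x]
  | x :: y :: rest => if x = y then x * 2 :: mergePairs rest else x :: mergePairs (y :: rest)

def move_tiles_alt (game_map : List (List Int)) : List (List Int) :=
  let l := game_map.length
  if (l : Int) < 2 then game_map
  else
    game_map.map (fun row =>
      let tiles := (List.range l).filterMap (fun j =>
        (row[j]?).bind (fun x => if x ≠ 0 then some x else none))
      let merged := mergePairs tiles
      merged ++ List.replicate (l - merged.length) 0)

-- ===== PRECONDITION & SPEC =====
-- Pre_ restricts to square maps (plus maps with fewer than two rows, which both versions return
-- unchanged), the natural domain of this slide-and-merge task: A uses the number of rows as the row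
-- length, so on shorter rows of a non-square map it raises IndexError, and on longer rows it returns
-- accidentally half-processed values, an artefact B (built for the square board) does not reproduce.
def Pre_move_tiles (game_map : List (List Int)) : Prop :=
  (game_map.length : Int) < 2 ∨ ∀ row ∈ game_map, row.length = game_map.length
instance (game_map : List (List Int)) : Decidable (Pre_move_tiles game_map) := by
  unfold Pre_move_tiles; infer_instance

def pvWitness_move_tiles : List (List Int) := [[2, 2], [0, 4]]

def Spec_move_tiles (game_map : List (List Int)) (out : List (List Int)) : Prop := out = move_tiles_alt game_map
instance (game_map : List (List Int)) (out : List (List Int)) : Decidable (Spec_move_tiles game_map out) := by unfold Spec_move_tiles; infer_instance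

-- ===== CLAIM (what is proved, stated in full; the proofs are below) =====
def Claim_equal_move_tiles : Prop := ∀ (game_map : List (List Int)), Dom_move_tiles game_map → Pre_move_tiles game_map → Spec_move_tiles game_map (move_tiles game_map)

-- ===== LEMMAS AND PROOFS =====

theorem mergePairs_length_le : ∀ t : List Int, (mergePairs t).length ≤ t.length
  | [] => by simp [mergePairs]
  | [x] => by simp [mergePairs]
  | x :: y :: rest => by
      have h1 := mergePairs_length_le rest
      have h2 := mergePairs_length_le (y :: rest)
      by_cases h : x = y <;> simp [mergePairs, h] at h1 h2 ⊢ <;> omega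

theorem filter_length_count (row : List Int) :
    (row.filter (fun x => x ≠ 0)).length + row.count 0 = row.length := by
  induction row with
  | nil => simp
  | cons x xs ih => by_cases h : x = 0 <;> simp [h] at ih ⊢ <;> omega

theorem filter_erase_zero (row : List Int) :
    ((row.erase 0).filter (fun x => x ≠ 0)) = row.filter (fun x => x ≠ 0) := by
  induction row with
  | nil => simp
  | cons x xs ih => by_cases h : x = 0 <;> simp [h, ne_eq, List.erase_cons] at ih ⊢ <;> simp [ih]

-- A's zero-compaction loop moves all zeros, in order, to the back of the row
theorem compact_iterate (c t : Nat) (row : List Int) (hc : row.count 0 = c) :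
    compactOnce^[c] (row ++ List.replicate t 0)
      = row.filter (fun x => x ≠ 0) ++ List.replicate (c + t) 0 := by
  induction c generalizing row t with
  | zero =>
      have hself : row.filter (fun x => x ≠ 0) = row := by
        rw [List.filter_eq_self]
        intro a ha
        simp only [List.count_eq_zero] at hc
        simp only [ne_eq, decide_eq_true_eq]
        rintro rfl; exact hc ha
      rw [Function.iterate_zero_apply, hself, Nat.zero_add]
  | succ c ih =>
      have h0 : (0 : Int) ∈ row := List.count_pos_iff.mp (by omega)
      have hrem : PySem.List.remove? (row ++ List.replicate t 0) 0
          = some ((row ++ List.replicate t 0).erase 0) :=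
        PySem.List.remove?_eq_some_erase _ 0 (by simp [h0])
      rw [Function.iterate_succ_apply]
      have hstep : compactOnce (row ++ List.replicate t 0)
          = row.erase 0 ++ List.replicate (t + 1) 0 := by
        unfold compactOnce
        rw [hrem, List.erase_append_left _ h0]
        simp [List.replicate_succ']
      rw [hstep, ih (t + 1) (row.erase 0) (by rw [List.count_erase_self]; omega),
          filter_erase_zero]
      congr 2
      omega

theorem eraseIdx_at_append (q : List Int) (y : Int) (ys : List Int) :
    (q ++ y :: ys).eraseIdx q.length = q ++ ys := by
  induction q with
  | nil => simp
  | cons a as ih => simp [List.eraseIdx, ih]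

theorem pop_at_append (q : List Int) (y : Int) (ys : List Int) :
    PySem.List.pop? (q ++ y :: ys) (q.length : Int) = some (y, q ++ ys) := by
  rw [PySem.List.pop?_natCast (q ++ y :: ys) q.length (by simp)]
  simp [List.getElem_append_right, eraseIdx_at_append]

theorem set_at_append (q : List Int) (y v : Int) (ys : List Int) :
    (q ++ y :: ys).set q.length v = q ++ v :: ys := by
  rw [List.set_append_right _ _ (le_refl _)]; simp

-- the state when fewer than two cells remain in view: the loop (or a stopped loop) changes nothing
theorem merge_small (tiles : List Int) (z : Nat) (pre : List Int)
    (hsmall : tiles.length + z ≤ 1) :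
    pre ++ (tiles ++ List.replicate z 0)
      = pre ++ mergePairs tiles
          ++ List.replicate (tiles.length + z - (mergePairs tiles).length) 0 := by
  match tiles with
  | [] => simp [mergePairs]
  | [x] =>
      have hz : z = 0 := by simp at hsmall; omega
      subst hz; simp [mergePairs]
  | x :: y :: rest => simp at hsmall; omega

-- A's pop-and-append merge loop computes B's single merge pass
theorem merge_invariant (fuel : Nat) (tiles : List Int) (z : Nat) (pre : List Int) (l : Int)
    (hnz : ∀ x ∈ tiles, x ≠ 0) (hfuel : tiles.length + z ≤ fuel + 1)
    (hl : l = (pre.length : Int) + tiles.length + z) :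
    mergeLoop fuel (pre ++ (tiles ++ List.replicate z 0)) pre.length ((pre.length : Int) + 1) l
      = pre ++ mergePairs tiles
          ++ List.replicate (tiles.length + z - (mergePairs tiles).length) 0 := by
  induction fuel generalizing tiles z pre l with
  | zero =>
      have hsmall : tiles.length + z ≤ 1 := hfuel
      simpa [mergeLoop] using merge_small tiles z pre hsmall
  | succ fuel ih =>
      by_cases hk : ((pre.length : Int) + 1) < l
      · have hbig : 1 < tiles.length + z := by omega
        rw [mergeLoop, if_pos hk]
        match tiles, hnz with
        | x :: y :: rest, hnz =>
            have hget1 : PySem.List.pyGet?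
                (pre ++ ((x :: y :: rest) ++ List.replicate z 0)) (pre.length : Int)
                = some x := by
              simpa using PySem.List.pyGet?_append_length pre (y :: rest ++ List.replicate z 0) x
            have hget2 : PySem.List.pyGet?
                (pre ++ ((x :: y :: rest) ++ List.replicate z 0)) ((pre.length : Int) + 1)
                = some y := by
              have := PySem.List.pyGet?_append_length (pre ++ [x])
                (rest ++ List.replicate z 0) y
              simpa using this
            by_cases hxy : x = y
            · have hpop : PySem.List.pop?
                  (pre ++ ((x :: y :: rest) ++ List.replicate z 0)) ((pre.length : Int) + 1)
                  = some (y, (pre ++ [x]) ++ (rest ++ List.replicate z 0)) := by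
                have := pop_at_append (pre ++ [x]) y (rest ++ List.replicate z 0)
                simpa using this
              have hstep : mergeStep (pre ++ ((x :: y :: rest) ++ List.replicate z 0))
                  (pre.length : Int) ((pre.length : Int) + 1)
                  = (pre ++ [x + y]) ++ (rest ++ List.replicate (z + 1) 0) := by
                unfold mergeStep
                rw [hget1, hget2]
                simp only [hpop, if_pos hxy]
                rw [PySem.List.pySetD_natCast]
                have := set_at_append pre x (x + y) (rest ++ List.replicate z 0)
                simp only [List.append_assoc, List.cons_append, List.nil_append] at this ⊢
                rw [this]
                simp [List.replicate_succ']
              rw [hstep]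
              have harith : (pre.length : Int) + 1 = (((pre ++ [x + y]).length : Nat) : Int) := by
                simp
              rw [harith]
              have := ih rest (z + 1) (pre ++ [x + y]) l
                (fun a ha => hnz a (by simp [ha]))
                (by simp at hfuel ⊢; omega)
                (by simp at hl ⊢; push_cast; omega)
              rw [show (((pre ++ [x + y]).length : Nat) : Int) + 1
                    = ((pre ++ [x + y]).length : Int) + 1 by simp] at this
              rw [this]
              have hxx : x + y = x * 2 := by omega
              have hle := mergePairs_length_le rest
              simp [mergePairs, hxy, hxx]
              congr 1
              omega
            · have hstep : mergeStep (pre ++ ((x :: y :: rest) ++ List.replicate z 0))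
                  (pre.length : Int) ((pre.length : Int) + 1)
                  = (pre ++ [x]) ++ ((y :: rest) ++ List.replicate z 0) := by
                unfold mergeStep
                rw [hget1, hget2]
                simp [hxy]
              rw [hstep]
              have harith : (pre.length : Int) + 1 = (((pre ++ [x]).length : Nat) : Int) := by
                simp
              rw [harith]
              have := ih (y :: rest) z (pre ++ [x]) l
                (fun a ha => hnz a (by simp at ha ⊢; tauto))
                (by simp at hfuel ⊢; omega)
                (by simp at hl ⊢; push_cast; omega)
              rw [show (((pre ++ [x]).length : Nat) : Int) + 1
                    = ((pre ++ [x]).length : Int) + 1 by simp] at this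
              rw [this]
              have hle := mergePairs_length_le (y :: rest)
              have hmp : mergePairs (x :: y :: rest) = x :: mergePairs (y :: rest) := by
                simp [mergePairs, hxy]
              rw [hmp]
              have hcnt : (x :: y :: rest).length + z - (x :: mergePairs (y :: rest)).length
                  = (y :: rest).length + z - (mergePairs (y :: rest)).length := by
                simp only [List.length_cons] at hle ⊢
                omega
              rw [hcnt]
              simp
        | [x], hnz =>
            have hz : 1 ≤ z := by simp at hbig; omega
            obtain ⟨z', rfl⟩ : ∃ z', z = z' + 1 := ⟨z - 1, by omega⟩
            have hrep : List.replicate (z' + 1) (0 : Int) = 0 :: List.replicate z' 0 := by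
              simp [List.replicate_succ]
            have hget1 : PySem.List.pyGet?
                (pre ++ ([x] ++ List.replicate (z' + 1) 0)) (pre.length : Int) = some x := by
              simpa using PySem.List.pyGet?_append_length pre (List.replicate (z' + 1) 0) x
            have hget2 : PySem.List.pyGet?
                (pre ++ ([x] ++ List.replicate (z' + 1) 0)) ((pre.length : Int) + 1)
                = some 0 := by
              have := PySem.List.pyGet?_append_length (pre ++ [x])
                (List.replicate z' 0) (0 : Int)
              simpa [hrep] using this
            have hstep : mergeStep (pre ++ ([x] ++ List.replicate (z' + 1) 0))
                (pre.length : Int) ((pre.length : Int) + 1)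
                = (pre ++ [x]) ++ ([] ++ List.replicate (z' + 1) 0) := by
              unfold mergeStep
              rw [hget1, hget2]
              simp [hnz x (by simp)]
            rw [hstep]
            have harith : (pre.length : Int) + 1 = (((pre ++ [x]).length : Nat) : Int) := by simp
            rw [harith]
            have := ih [] (z' + 1) (pre ++ [x]) l
              (by simp)
              (by simp at hfuel ⊢; omega)
              (by simp at hl ⊢; push_cast; omega)
            rw [show (((pre ++ [x]).length : Nat) : Int) + 1
                  = ((pre ++ [x]).length : Int) + 1 by simp] at this
            rw [this]
            simp [mergePairs]
        | [], hnz =>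
            have hz : 2 ≤ z := by simp at hbig; omega
            obtain ⟨z', rfl⟩ : ∃ z', z = z' + 2 := ⟨z - 2, by omega⟩
            have hrep : List.replicate (z' + 2) (0 : Int)
                = 0 :: 0 :: List.replicate z' 0 := by
              simp [List.replicate_succ]
            have hget1 : PySem.List.pyGet?
                (pre ++ ([] ++ List.replicate (z' + 2) 0)) (pre.length : Int) = some 0 := by
              simpa [hrep] using
                PySem.List.pyGet?_append_length pre (0 :: List.replicate z' 0) (0 : Int)
            have hget2 : PySem.List.pyGet?
                (pre ++ ([] ++ List.replicate (z' + 2) 0)) ((pre.length : Int) + 1)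
                = some 0 := by
              have := PySem.List.pyGet?_append_length (pre ++ [0])
                (List.replicate z' 0) (0 : Int)
              simpa [hrep] using this
            have hpop : PySem.List.pop?
                (pre ++ ([] ++ List.replicate (z' + 2) 0)) ((pre.length : Int) + 1)
                = some (0, (pre ++ [0]) ++ List.replicate z' 0) := by
              have := pop_at_append (pre ++ [0]) (0 : Int) (List.replicate z' 0)
              simpa [hrep] using this
            have hstep : mergeStep (pre ++ ([] ++ List.replicate (z' + 2) 0))
                (pre.length : Int) ((pre.length : Int) + 1)
                = (pre ++ [(0 : Int)]) ++ ([] ++ List.replicate (z' + 1) 0) := by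
              unfold mergeStep
              rw [hget1, hget2]
              simp only [hpop, if_pos rfl]
              rw [PySem.List.pySetD_natCast]
              have := set_at_append pre (0 : Int) ((0 : Int) + 0) (List.replicate z' 0)
              simp only [List.append_assoc, List.cons_append, List.nil_append] at this ⊢
              rw [this]
              simp [List.replicate_succ']
            rw [hstep]
            have harith : (pre.length : Int) + 1 = (((pre ++ [(0:Int)]).length : Nat) : Int) := by
              simp
            rw [harith]
            have := ih [] (z' + 1) (pre ++ [(0 : Int)]) l
              (by simp)
              (by simp at hfuel ⊢; omega)
              (by simp at hl ⊢; push_cast; omega)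
            rw [show (((pre ++ [(0:Int)]).length : Nat) : Int) + 1
                  = ((pre ++ [(0:Int)]).length : Int) + 1 by simp] at this
            rw [this]
            simp [mergePairs, List.replicate_succ]
      · have hsmall : tiles.length + z ≤ 1 := by omega
        rw [mergeLoop, if_neg hk]
        exact merge_small tiles z pre hsmall

theorem rowA_eq_rowB (l : Int) (row : List Int) (hl : (row.length : Int) = l) :
    mergeLoop ((PySem.List.pyRange 0 (PySem.List.count row 0) 1).foldl
                 (fun r _ => compactOnce r) row).length
        ((PySem.List.pyRange 0 (PySem.List.count row 0) 1).foldl (fun r _ => compactOnce r) row)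
        0 1 l
      = mergePairs (row.filter (fun x => x ≠ 0))
          ++ List.replicate
              (row.length - (mergePairs (row.filter (fun x => x ≠ 0))).length) 0 := by
  have hfold : (PySem.List.pyRange 0 (PySem.List.count row 0) 1).foldl
      (fun r _ => compactOnce r) row = compactOnce^[row.count 0] row := by
    rw [List.foldl_const]
    congr 1
    rw [PySem.List.count_eq, PySem.List.length_pyRange_one]
    simp
  have hcompact := compact_iterate (row.count 0) 0 row rfl
  simp only [List.replicate_zero, List.append_nil, Nat.add_zero] at hcompact
  rw [hfold, hcompact,
      show row.length = (row.filter (fun x => x ≠ 0)).length + row.count 0 from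
        (filter_length_count row).symm]
  have := merge_invariant
      ((row.filter (fun x => x ≠ 0)) ++ List.replicate (row.count 0) 0).length
      (row.filter (fun x => x ≠ 0)) (row.count 0) [] l
      (by intro x hx; simp at hx; exact hx.2)
      (by simp)
      (by
        have h := filter_length_count row
        simp only [ne_eq, decide_not] at h ⊢
        simp only [List.length_nil, Nat.cast_zero, Nat.cast_add, zero_add]
        omega)
  simpa using this

theorem window_filterMap (h : Int → Option Int) (row : List Int) :
    (List.range row.length).filterMap (fun j => (row[j]?).bind h) = row.filterMap h := by
  induction row using List.reverseRecOn with
  | nil => simp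
  | append_singleton xs x ih =>
      have hcong : ∀ j ∈ List.range xs.length,
          (((xs ++ [x])[j]?).bind h) = ((xs[j]?).bind h) := by
        intro j hj
        rw [List.getElem?_append_left (List.mem_range.mp hj)]
      rw [List.length_append, List.length_singleton, List.range_succ,
          List.filterMap_append, List.filterMap_congr hcong, ih,
          List.filterMap_append]
      congr 1
      rw [List.filterMap_cons, List.filterMap_nil, List.filterMap_cons, List.filterMap_nil,
          List.getElem?_concat_length]
      rfl

theorem window_filter (row : List Int) :
    (List.range row.length).filterMap (fun j =>
        (row[j]?).bind (fun x => if x ≠ 0 then some x else none))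
      = row.filter (fun x => x ≠ 0) := by
  rw [window_filterMap]
  induction row with
  | nil => simp
  | cons a as ih => by_cases h : a = 0 <;> simpa [h] using ih

-- ===== VERDICT (by name: the statement is the Claim_ definition above) =====
theorem move_tiles_spec : Claim_equal_move_tiles := by
  intro gm hdom hpre
  unfold Spec_move_tiles move_tiles move_tiles_alt
  simp only [PySem.List.len_eq]
  by_cases hl : ((gm.length : Int) < 2)
  · rw [if_pos hl, if_pos hl]
  · rw [if_neg hl, if_neg hl]
    have hsq : ∀ row ∈ gm, row.length = gm.length := by
      rcases hpre with h | h
      · exact absurd h hl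
      · exact h
    apply List.map_congr_left
    intro row hrow
    have h1 : row.length = gm.length := hsq row hrow
    rw [← h1, window_filter]
    exact rowA_eq_rowB (row.length : Int) row rfl
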